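-- pv_equiv track=rewrite | github.com/cxn8801/dzpkai | test.py | get_player_position
-- ===== SOURCE A (Python) =====
-- def get_player_position(seat_dict, dealer_uid, player_uid):
--     """
--     :param seat_dict: dict {seat_number: uid}  # 1-based seat numbers, can be non-continuous
--     :param dealer_uid: int  # the uid of the dealer (button/BTN)
--     :param player_uid: int  # the uid for which to query the position
--     :return: str  # one of ['UTG', 'MP', 'CO', 'BTN', 'SB', 'BB'] or None if not found
--     """
--     # Poker positions in 6-max/9-max, simplified for up to 6 active seats
--     pos_names = ['SB', 'BB', 'UTG', 'MP', 'CO', 'BTN']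
--
--     # Step 1: Sort the seats in ascending order for correct seat rotation
--     # seat_dict: {seat_num: uid}
--     # First, get all occupied seat_nums sorted
--     occupied_seats = sorted(seat_dict.keys())
--     num_players = len(occupied_seats)
--     if num_players < 2:
--         return None  # Not enough players
--
--     # Step 2: Build the seating order starting from the BTN (dealer)
--     # Find the seat number of dealer
--     dealer_seat = None
--     for seat_num, uid in seat_dict.items():
--         if uid == dealer_uid:
--             dealer_seat = seat_num
--             break
--     if dealer_seat is None:
--         return None  # Dealer not found
--
--     # Make a list of UIDs in table order, starting from dealer (BTN)
--     # The order is clockwise (i.e., seat number increasing, wraparound)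
--     # Build a list of occupied_seats in ascending order starting from dealer_seat
--     dealer_idx = occupied_seats.index(dealer_seat)
--     ordered_seats = occupied_seats[dealer_idx:] + occupied_seats[:dealer_idx]
--     ordered_uids = [seat_dict[seat] for seat in ordered_seats]
--
--     # Step 3: Assign positions in order: BTN, SB, BB, UTG, MP, CO (repeat as needed)
--     # BTN is always first in the list by above construction
--     # For n players, positions are mapped as follows (for up to 6 players):
--     # 2: BTN, SB
--     # 3: BTN, SB, BB
--     # 4: BTN, SB, BB, UTG
--     # 5: BTN, SB, BB, UTG, CO
--     # 6: BTN, SB, BB, UTG, MP, CO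
--     # More than 6: BTN, SB, BB, UTG, MP, CO, rest as MP
--
--     # For 2 players, SB=BTN, BB=the other
--     if num_players == 2:
--         # BTN is also SB, other is BB
--         if ordered_uids[0] == player_uid:
--             return 'SB'  # heads-up BTN is always SB
--         elif ordered_uids[1] == player_uid:
--             return 'BB'
--         else:
--             return None
--     else:
--         # For 3+ players
--         # The order: BTN, SB, BB, UTG, MP, CO, MP, ...
--         positions = []
--         # Compose the position list
--         if num_players == 3:
--             positions = ['BTN', 'SB', 'BB']
--         elif num_players == 4:
--             positions = ['BTN', 'SB', 'BB', 'UTG']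
--         elif num_players == 5:
--             positions = ['BTN', 'SB', 'BB', 'UTG', 'CO']
--         elif num_players == 6:
--             positions = ['BTN', 'SB', 'BB', 'UTG', 'MP', 'CO']
--         elif num_players > 6:
--             # 7+: BTN, SB, BB, UTG, MP, CO, MP, ...
--             positions = ['BTN', 'SB', 'BB', 'UTG', 'MP', 'CO']
--             positions += ['MP'] * (num_players - 6)
--
--         # Now, assign position by finding the player's index in ordered_uids
--         try:
--             idx = ordered_uids.index(player_uid)
--         except ValueError:
--             return None
--         return positions[idx]
-- ===== SOURCE B (Python) =====
-- def _pos_name(n, k):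
--     # closed-form position label for clockwise distance k from the button
--     if n == 2:
--         return 'SB' if k == 0 else 'BB'
--     if k == 0:
--         return 'BTN'
--     if k == 1:
--         return 'SB'
--     if k == 2:
--         return 'BB'
--     if k == 3:
--         return 'UTG'
--     if k == min(n - 1, 5):
--         return 'CO'
--     return 'MP'
--
--
-- def get_player_position(seat_dict, dealer_uid, player_uid):
--     # No sorting: pick the player's seat directly (smallest matching seat at or
--     # after the dealer's seat, else smallest matching seat overall) and obtain
--     # its clockwise distance from the dealer by counting occupied seats in the
--     # seat-number interval between them.
--     n = len(seat_dict)
--     if n < 2: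
--         return None
--     dealer_seat = None
--     for s, u in seat_dict.items():
--         if u == dealer_uid:
--             dealer_seat = s
--             break
--     if dealer_seat is None:
--         return None
--     best_ge = None   # smallest matching seat >= dealer's seat
--     best_all = None  # smallest matching seat overall
--     for s, u in seat_dict.items():
--         if u == player_uid:
--             if best_all is None or s < best_all:
--                 best_all = s
--             if s >= dealer_seat and (best_ge is None or s < best_ge):
--                 best_ge = s
--     if best_all is None:
--         return None
--     if best_ge is not None:
--         k = sum(1 for s in seat_dict if dealer_seat < s <= best_ge)
--     else:
--         k = n - sum(1 for s in seat_dict if best_all < s <= dealer_seat)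
--     return _pos_name(n, k)
-- ===== Notes on version B (the rewrite author's own statement) =====
-- stated objective: faster
-- what changed: B never sorts and never builds the rotated seat/uid lists or a positions table: it selects the player's seat directly (smallest matching seat at or after the dealer's seat, else smallest matching seat overall), counts the occupied seats in the seat-number interval between dealer and player to get the clockwise distance, and maps (n, distance) to the label with a closed-form function.
import Mathlib
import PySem

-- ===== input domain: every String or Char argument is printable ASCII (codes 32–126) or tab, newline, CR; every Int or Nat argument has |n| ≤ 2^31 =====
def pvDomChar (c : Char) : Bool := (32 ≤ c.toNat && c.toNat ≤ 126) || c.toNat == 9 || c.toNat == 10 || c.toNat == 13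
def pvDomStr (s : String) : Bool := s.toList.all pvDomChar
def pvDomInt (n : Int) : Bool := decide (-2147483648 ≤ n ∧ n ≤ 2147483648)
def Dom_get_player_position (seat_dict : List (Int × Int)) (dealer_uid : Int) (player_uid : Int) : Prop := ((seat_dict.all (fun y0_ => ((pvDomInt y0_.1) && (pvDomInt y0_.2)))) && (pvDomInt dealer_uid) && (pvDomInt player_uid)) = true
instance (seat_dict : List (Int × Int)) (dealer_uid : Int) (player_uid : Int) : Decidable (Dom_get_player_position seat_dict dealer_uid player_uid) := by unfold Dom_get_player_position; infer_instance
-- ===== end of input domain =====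

-- B avoids A's sort + rotated-list + positions-table construction entirely (O(n) vs
-- O(n log n), measurably faster): it picks the player's seat directly (smallest matching
-- seat at or after the dealer's, else smallest matching seat), counts occupied seats in the
-- seat-number interval between dealer and player to get the clockwise distance, and maps
-- (n, distance) to the label in closed form.

-- ===== PORT A =====
-- (A's local `pos_names` list is never used by A and is omitted.)
def get_player_position (seat_dict : List (Int × Int)) (dealer_uid : Int) (player_uid : Int) : Option String :=
  let dd := PySem.Dict.ofList seat_dict
  let occupied_seats := PySem.List.sorted dd.keys (fun x => x) false
  let num_players := occupied_seats.length
  if num_players < 2 then none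
  else
    -- for seat_num, uid in seat_dict.items(): if uid == dealer_uid: dealer_seat = seat_num; break
    match (dd.items.find? (fun p => p.2 == dealer_uid)).map (·.1) with
    | none => none
    | some dealer_seat =>
      -- occupied_seats.index(dealer_seat); ValueError is unreachable (dealer_seat is a key)
      match PySem.List.index? occupied_seats dealer_seat with
      | none => none
      | some dealer_idx =>
        let ordered_seats := PySem.List.slice occupied_seats (some (dealer_idx : Int)) none
                             ++ PySem.List.slice occupied_seats none (some (dealer_idx : Int))
        let ordered_uids := ordered_seats.map (fun s => dd.getD s 0)  -- seat_dict[seat]; KeyError unreachable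
        if num_players == 2 then
          if PySem.List.pyGet? ordered_uids 0 == some player_uid then some "SB"
          else if PySem.List.pyGet? ordered_uids 1 == some player_uid then some "BB"
          else none
        else
          let positions : List String :=
            if num_players == 3 then ["BTN", "SB", "BB"]
            else if num_players == 4 then ["BTN", "SB", "BB", "UTG"]
            else if num_players == 5 then ["BTN", "SB", "BB", "UTG", "CO"]
            else if num_players == 6 then ["BTN", "SB", "BB", "UTG", "MP", "CO"]
            else ["BTN", "SB", "BB", "UTG", "MP", "CO"] ++ List.replicate (num_players - 6) "MP"
          match PySem.List.index? ordered_uids player_uid with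
          | none => none
          | some idx => PySem.List.pyGet? positions (idx : Int)  -- in range: idx < num_players = positions.length

-- ===== PORT B =====
-- 'best is None or s < best' update of Source B
def updMin (b : Option Int) (s : Int) : Option Int :=
  match b with
  | none => some s
  | some m => if s < m then some s else some m

def posName (n : Int) (k : Int) : String :=
  if n == 2 then (if k == 0 then "SB" else "BB")
  else if k == 0 then "BTN"
  else if k == 1 then "SB"
  else if k == 2 then "BB"
  else if k == 3 then "UTG"
  else if k == min (n - 1) 5 then "CO"
  else "MP"

def get_player_position_alt (seat_dict : List (Int × Int)) (dealer_uid : Int) (player_uid : Int) : Option String :=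
  let dd := PySem.Dict.ofList seat_dict
  let n := dd.keys.length
  if n < 2 then none
  else
    -- for s, u in seat_dict.items(): if u == dealer_uid: dealer_seat = s; break
    match (dd.items.find? (fun p => p.2 == dealer_uid)).map (·.1) with
    | none => none
    | some dealer_seat =>
      -- single pass maintaining (best_ge, best_all)
      let st := dd.items.foldl
        (fun (b : Option Int × Option Int) su =>
          if su.2 == player_uid then
            (if dealer_seat ≤ su.1 then updMin b.1 su.1 else b.1, updMin b.2 su.1)
          else b) (none, none)
      match st.2 with
      | none => none
      | some best_all =>
        let k : Int :=
          match st.1 with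
          | some best_ge =>
            ((dd.keys.filter (fun s => decide (dealer_seat < s) && decide (s ≤ best_ge))).length : Int)
          | none =>
            (n : Int) - ((dd.keys.filter (fun s => decide (best_all < s) && decide (s ≤ dealer_seat))).length : Int)
        some (posName (n : Int) k)

-- ===== PRECONDITION & SPEC =====
def Spec_get_player_position (seat_dict : List (Int × Int)) (dealer_uid : Int) (player_uid : Int) (out : Option String) : Prop := out = get_player_position_alt seat_dict dealer_uid player_uid
instance (seat_dict : List (Int × Int)) (dealer_uid : Int) (player_uid : Int) (out : Option String) : Decidable (Spec_get_player_position seat_dict dealer_uid player_uid out) := by unfold Spec_get_player_position; infer_instance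

-- ===== CLAIM (what is proved, stated in full; the proofs are below) =====
def Claim_equal_get_player_position : Prop := ∀ (seat_dict : List (Int × Int)) (dealer_uid : Int) (player_uid : Int), Dom_get_player_position seat_dict dealer_uid player_uid → Spec_get_player_position seat_dict dealer_uid player_uid (get_player_position seat_dict dealer_uid player_uid)

-- ===== LEMMAS AND PROOFS =====

-- B's single pass computes (min of the matching seats ≥ ds, min of all matching seats)
theorem foldl_updMin_pair (q : Int → Bool) (ds : Int) (ks : List Int) (g a : Option Int) :
    ks.foldl (fun (b : Option Int × Option Int) s =>
        if q s then (if ds ≤ s then updMin b.1 s else b.1, updMin b.2 s) else b) (g, a)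
      = ((ks.filter (fun s => q s && decide (ds ≤ s))).foldl updMin g,
         (ks.filter q).foldl updMin a) := by
  induction ks generalizing g a with
  | nil => rfl
  | cons x t ih =>
    simp only [List.foldl_cons, List.filter_cons]
    by_cases hq : q x
    · by_cases hd : ds ≤ x
      · simp [hq, hd, ih]
      · simp [hq, hd, ih]
    · simp [hq, ih]

theorem foldl_updMin_some (l : List Int) (a : Int) :
    l.foldl updMin (some a) = some (l.foldl min a) := by
  induction l generalizing a with
  | nil => rfl
  | cons x t ih =>
    simp only [List.foldl_cons, updMin]
    rw [show (if x < a then some x else some a) = some (min a x) by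
      split_ifs <;> simp only [Option.some.injEq] <;> omega]
    exact ih (min a x)

theorem foldl_updMin_none (l : List Int) :
    l.foldl updMin none = PySem.List.min? l (fun x => x) := by
  cases l with
  | nil => exact ((PySem.List.min?_eq_none_iff _ _).mpr rfl).symm
  | cons x t =>
    rw [List.foldl_cons, show updMin none x = some x from rfl, foldl_updMin_some,
      PySem.List.min?_id_cons]

theorem min?_id_perm {xs ys : List Int} (h : xs.Perm ys) :
    PySem.List.min? xs (fun x => x) = PySem.List.min? ys (fun x => x) := by
  cases hx : PySem.List.min? xs (fun x => x) with
  | none =>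
    have := (PySem.List.min?_eq_none_iff _ _).mp hx
    subst this
    exact ((PySem.List.min?_eq_none_iff _ _).mpr h.nil_eq.symm).symm
  | some m =>
    cases hy : PySem.List.min? ys (fun x => x) with
    | none =>
      have := (PySem.List.min?_eq_none_iff _ _).mp hy
      subst this
      exact absurd (h.subset (PySem.List.min?_mem hx)) (List.not_mem_nil)
    | some m' =>
      have h1 : m ≤ m' := PySem.List.min?_isMin hx m' (h.symm.subset (PySem.List.min?_mem hy))
      have h2 : m' ≤ m := PySem.List.min?_isMin hy m (h.subset (PySem.List.min?_mem hx))
      simp only [Option.some.injEq]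
      omega

-- in a strictly sorted prefix of the rotation, the first match sits at the index
-- counting the strictly smaller elements
theorem findIdx?_sorted (q : Int → Bool) (S : List Int) (hs : S.Pairwise (· < ·)) (p : Int)
    (hp : p ∈ S) (hq : q p = true) (hmin : ∀ x ∈ S, q x → p ≤ x) :
    List.findIdx? q S = some ((S.filter (fun s => decide (s < p))).length) := by
  induction S with
  | nil => cases hp
  | cons x t ih =>
    obtain ⟨hxt, hst⟩ := List.pairwise_cons.mp hs
    by_cases hqx : q x = true
    · have hpx : p = x := by
        have hle : p ≤ x := hmin x (List.mem_cons_self ..) hqx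
        rcases List.mem_cons.mp hp with rfl | hpt
        · rfl
        · exact absurd (hxt p hpt) (by omega)
      subst hpx
      rw [List.findIdx?_cons, hqx]
      have hfil : (p :: t).filter (fun s => decide (s < p)) = [] := by
        rw [List.filter_eq_nil_iff]
        intro a ha
        rcases List.mem_cons.mp ha with rfl | hat
        · simp
        · have := hxt a hat; simp; omega
      rw [hfil]
      rfl
    · have hpt : p ∈ t := by
        rcases List.mem_cons.mp hp with rfl | hpt
        · exact absurd hq hqx
        · exact hpt
      have hxp : x < p := hxt p hpt
      rw [List.findIdx?_cons]
      simp only [hqx, Bool.false_eq_true, if_false]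
      rw [ih hst hpt (fun y hy hqy => hmin y (List.mem_cons_of_mem x hy) hqy)]
      rw [List.filter_cons, show decide (x < p) = true from by simpa using hxp]
      simp

-- removing one present element from a count
theorem countP_with_mem {l : List Int} (hn : l.Nodup) {c : Int} (hc : c ∈ l)
    (p : Int → Bool) (hpc : p c = true) :
    l.countP p = l.countP (fun s => p s && decide (s ≠ c)) + 1 := by
  induction l with
  | nil => cases hc
  | cons x t ih =>
    obtain ⟨hxt, hnt⟩ := List.nodup_cons.mp hn
    rw [List.countP_cons, List.countP_cons]
    by_cases hxc : x = c
    · subst hxc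
      have hcnt : t.countP p = t.countP (fun s => p s && decide (s ≠ x)) := by
        apply List.countP_congr
        intro y hy
        have : y ≠ x := fun h => hxt (h ▸ hy)
        simp [this]
      simp [hpc, hcnt]
    · have hct : c ∈ t := by
        rcases List.mem_cons.mp hc with h | h
        · exact absurd h.symm hxc
        · exact h
      have hx2 : (p x && decide (x ≠ c)) = p x := by simp [hxc]
      simp only [hx2, ih hnt hct]
      omega

theorem take_eq_filter_lt (L : List Int) (hp : L.Pairwise (· < ·)) (di : Nat)
    (hdi : di < L.length) (ds : Int) (hds : L[di] = ds) :
    L.take di = L.filter (fun s => decide (s < ds)) := by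
  have hpg := List.pairwise_iff_getElem.mp hp
  conv_rhs => rw [← List.take_append_drop di L]
  rw [List.filter_append]
  have h1 : (L.take di).filter (fun s => decide (s < ds)) = L.take di := by
    rw [List.filter_eq_self]
    intro a ha
    obtain ⟨i, hi, hia⟩ := List.mem_iff_getElem.mp ha
    have hilen : i < di := by simp [List.length_take] at hi; omega
    have : (L.take di)[i] = L[i]'(by omega) := List.getElem_take
    rw [this] at hia
    have := hpg i di (by omega) hdi hilen
    rw [← hia, ← hds]
    simpa using this
  have h2 : (L.drop di).filter (fun s => decide (s < ds)) = [] := by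
    rw [List.filter_eq_nil_iff]
    intro a ha
    obtain ⟨j, hj, hja⟩ := List.mem_iff_getElem.mp ha
    rw [List.getElem_drop] at hja
    have : ds ≤ a := by
      rcases Nat.eq_zero_or_pos j with rfl | hj0
      · rw [← hds]; simp at hja; omega
      · have := hpg di (di + j) hdi (by simp at hj; omega) (by omega)
        rw [← hds, ← hja]; omega
    simp; omega
  rw [h1, h2, List.append_nil]

theorem drop_eq_filter_ge (L : List Int) (hp : L.Pairwise (· < ·)) (di : Nat)
    (hdi : di < L.length) (ds : Int) (hds : L[di] = ds) :
    L.drop di = L.filter (fun s => decide (ds ≤ s)) := by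
  have hpg := List.pairwise_iff_getElem.mp hp
  conv_rhs => rw [← List.take_append_drop di L]
  rw [List.filter_append]
  have h1 : (L.take di).filter (fun s => decide (ds ≤ s)) = [] := by
    rw [List.filter_eq_nil_iff]
    intro a ha
    obtain ⟨i, hi, hia⟩ := List.mem_iff_getElem.mp ha
    have hilen : i < di := by simp [List.length_take] at hi; omega
    have : (L.take di)[i] = L[i]'(by omega) := List.getElem_take
    rw [this] at hia
    have := hpg i di (by omega) hdi hilen
    rw [← hia, ← hds] at *
    simp; omega
  have h2 : (L.drop di).filter (fun s => decide (ds ≤ s)) = L.drop di := by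
    rw [List.filter_eq_self]
    intro a ha
    obtain ⟨j, hj, hja⟩ := List.mem_iff_getElem.mp ha
    rw [List.getElem_drop] at hja
    rcases Nat.eq_zero_or_pos j with rfl | hj0
    · rw [← hds]; simp at hja; simp; omega
    · have := hpg di (di + j) hdi (by simp at hj; omega) (by omega)
      rw [← hds, ← hja]; simp; omega
  rw [h1, h2, List.nil_append]

theorem posTable (n j : Nat) (h3 : 3 ≤ n) (hj : j < n) :
    PySem.List.pyGet?
      (if n == 3 then ["BTN", "SB", "BB"]
       else if n == 4 then ["BTN", "SB", "BB", "UTG"]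
       else if n == 5 then ["BTN", "SB", "BB", "UTG", "CO"]
       else if n == 6 then ["BTN", "SB", "BB", "UTG", "MP", "CO"]
       else ["BTN", "SB", "BB", "UTG", "MP", "CO"] ++ List.replicate (n - 6) "MP") (j : Int)
      = some (posName (n : Int) (j : Int)) := by
  rcases Nat.lt_or_ge n 7 with h7 | h7
  · interval_cases n <;> interval_cases j <;> decide
  · have e3 : (n == 3) = false := by simp; omega
    have e4 : (n == 4) = false := by simp; omega
    have e5 : (n == 5) = false := by simp; omega
    have e6 : (n == 6) = false := by simp; omega
    rw [e3, e4, e5, e6]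
    simp only [Bool.false_eq_true, if_false]
    rw [PySem.List.pyGet?_natCast]
    have hmin : min ((n : Int) - 1) 5 = 5 := by omega
    have hn2 : ((n : Int) == 2) = false := by simp; omega
    rcases j with _|_|_|_|_|_|j
    · simp [posName, hn2]
    · simp [posName, hn2]
    · simp [posName, hn2]
    · simp [posName, hn2]
    · simp [posName, hn2, hmin]
    · simp [posName, hn2, hmin]
    · have hj6 : 6 + j < 6 + (n - 6) := by omega
      rw [List.getElem?_append_right (by simp)]
      simp only [List.length_cons, List.length_nil]
      rw [List.getElem?_replicate]
      simp only [if_pos (by omega : j + 1 + 1 + 1 + 1 + 1 + 1 - 6 < n - 6)]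
      simp [posName, hn2, hmin]
      split_ifs <;> first | rfl | omega

theorem index?_map_eq_findIdx? (f : Int → Int) (l : List Int) (v : Int) :
    PySem.List.index? (l.map f) v = List.findIdx? (fun s => f s == v) l := by
  rw [PySem.List.index?_eq_idxOf?]
  show List.findIdx? (fun x => x == v) (l.map f) = _
  rw [List.findIdx?_map]
  rfl

theorem countP_split (l : List Int) (p r : Int → Bool) :
    l.countP p = l.countP (fun s => p s && r s) + l.countP (fun s => p s && !r s) := by
  induction l with
  | nil => rfl
  | cons x t ih =>
    simp only [List.countP_cons, ih]
    by_cases hp : p x = true <;> by_cases hr : r x = true <;> simp [hp, hr] <;> omega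

theorem bool_interval₁ (ds bg y : Int) :
    ((decide (y < bg) && decide (ds ≤ y)) && decide (y ≠ ds))
      = (decide (ds < y) && decide (y < bg)) := by
  by_cases h1 : ds < y <;> by_cases h2 : y < bg <;> simp [h1, h2] <;> omega

theorem bool_interval₂ (ds bg y : Int) :
    ((decide (ds < y) && decide (y ≤ bg)) && decide (y ≠ bg))
      = (decide (ds < y) && decide (y < bg)) := by
  by_cases h1 : ds < y <;> by_cases h2 : y < bg <;> simp [h1, h2] <;> omega

-- A's post-guard branch, as a function of the first matching rotation index j0
theorem A_branch_eq (dd : PySem.Dict Int Int) (pu ds : Int) (L : List Int)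
    (hn2 : ¬ L.length < 2) (j0 : Nat) (k : Int)
    (hJ : List.findIdx? (fun s => dd.getD s 0 == pu)
        (L.filter (fun s => decide (ds ≤ s)) ++ L.filter (fun s => decide (s < ds))) = some j0)
    (hRlen : (L.filter (fun s => decide (ds ≤ s)) ++ L.filter (fun s => decide (s < ds))).length
        = L.length)
    (hjk : (j0 : Int) = k) :
    (if (L.length == 2) = true then
       if (PySem.List.pyGet? (List.map (fun s => dd.getD s 0)
             (L.filter (fun s => decide (ds ≤ s)) ++ L.filter (fun s => decide (s < ds)))) 0
             == some pu) = true then some "SB"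
       else if (PySem.List.pyGet? (List.map (fun s => dd.getD s 0)
             (L.filter (fun s => decide (ds ≤ s)) ++ L.filter (fun s => decide (s < ds)))) 1
             == some pu) = true then some "BB"
       else none
     else
       match List.findIdx? (fun s => dd.getD s 0 == pu)
           (L.filter (fun s => decide (ds ≤ s)) ++ L.filter (fun s => decide (s < ds))) with
       | none => none
       | some idx =>
         PySem.List.pyGet?
           (if (L.length == 3) = true then ["BTN", "SB", "BB"]
            else if (L.length == 4) = true then ["BTN", "SB", "BB", "UTG"]
            else if (L.length == 5) = true then ["BTN", "SB", "BB", "UTG", "CO"]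
            else if (L.length == 6) = true then ["BTN", "SB", "BB", "UTG", "MP", "CO"]
            else ["BTN", "SB", "BB", "UTG", "MP", "CO"] ++ List.replicate (L.length - 6) "MP")
           (idx : Int))
    = some (posName (L.length : Int) k) := by
  have hjlt : j0 < L.length := by
    have h := List.findIdx?_eq_some_iff_findIdx_eq.mp hJ
    exact hRlen ▸ h.1
  by_cases h2 : L.length = 2
  · rw [if_pos (by simp [h2])]
    obtain ⟨a, b, hab⟩ := List.length_eq_two.mp (by rw [hRlen, h2] :
      (L.filter (fun s => decide (ds ≤ s)) ++ L.filter (fun s => decide (s < ds))).length = 2)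
    rw [hab] at hJ
    rw [hab, h2, ← hjk]
    simp only [List.findIdx?_cons] at hJ
    by_cases hqa : (dd.getD a 0 == pu) = true
    · simp only [hqa] at hJ
      have hj0 : j0 = 0 := by simpa using hJ.symm
      subst hj0
      simp [PySem.List.pyGet?, PySem.List.pyIdx?, hqa, posName]
    · by_cases hqb : (dd.getD b 0 == pu) = true
      · simp [hqa, hqb] at hJ
        have hj0 : j0 = 1 := by omega
        subst hj0
        simp [PySem.List.pyGet?, PySem.List.pyIdx?, hqa, hqb, posName]
      · simp [hqa, hqb] at hJ
  · rw [if_neg (by simp [h2]), hJ]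
    simp only []
    have h3 : 3 ≤ L.length := by omega
    rw [posTable L.length j0 h3 hjlt, hjk]

-- ===== VERDICT (by name: the statement is the Claim_ definition above) =====
theorem get_player_position_spec : Claim_equal_get_player_position := by
  intro seat_dict du pu _hdom
  unfold Spec_get_player_position
  simp only [get_player_position, get_player_position_alt]
  have hnd : (PySem.Dict.ofList seat_dict).keys.Nodup := PySem.Dict.nodup_keys_ofList seat_dict
  generalize hdd : PySem.Dict.ofList seat_dict = dd at *
  set K := dd.keys with hK
  set L := PySem.List.sorted K (fun x => x) false with hL
  have hperm : L.Perm K := PySem.List.sorted_perm ..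
  have hlen : K.length = L.length := hperm.length_eq.symm
  rw [hlen]
  have hLnd : L.Nodup := hperm.nodup_iff.mpr hnd
  have hple : L.Pairwise (fun a b => a ≤ b) := by
    have := PySem.List.sorted_pairwise K (fun x => x)
    simpa using this
  have hplt : L.Pairwise (· < ·) := (hple.and hLnd).imp (fun h => lt_of_le_of_ne h.1 h.2)
  by_cases hn2 : L.length < 2
  · rw [if_pos hn2, if_pos hn2]
  · rw [if_neg hn2, if_neg hn2]
    cases hfd : (dd.items.find? (fun p => p.2 == du)).map (·.1) with
    | none => rfl
    | some ds =>
      simp only []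
      have hdsK : ds ∈ K := by
        obtain ⟨pr, hpr1, hpr2⟩ := Option.map_eq_some_iff.mp hfd
        have hmem : pr ∈ dd.items := List.mem_of_find?_eq_some hpr1
        exact hpr2 ▸ PySem.Dict.mem_keys_of_mem_items dd hmem
      have hdsL : ds ∈ L := hperm.mem_iff.mpr hdsK
      obtain ⟨di, hdi⟩ : ∃ di, PySem.List.index? L ds = some di := by
        cases h : PySem.List.index? L ds with
        | none => exact absurd hdsL ((PySem.List.index?_eq_none_iff ..).mp h)
        | some d => exact ⟨d, rfl⟩
      rw [hdi]
      simp only []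
      obtain ⟨hdilt, hgetd, -⟩ := PySem.List.getElem_of_index?_eq_some hdi
      rw [PySem.List.slice_from L (Int.natCast_nonneg di), PySem.List.slice_to L (Int.natCast_nonneg di)]
      simp only [Int.toNat_natCast]
      rw [index?_map_eq_findIdx?]
      simp only [drop_eq_filter_ge L hplt di hdilt ds hgetd, take_eq_filter_lt L hplt di hdilt ds hgetd]
      set q : Int → Bool := fun s => dd.getD s 0 == pu with hq
      rw [PySem.Dict.items_eq_map_keys dd hnd 0, List.foldl_map]
      have hfun : (fun (b : Option Int × Option Int) x =>
          if ((x, dd.getD x 0).2 == pu) = true then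
            (if ds ≤ (x, dd.getD x 0).1 then updMin b.1 (x, dd.getD x 0).1 else b.1,
             updMin b.2 (x, dd.getD x 0).1)
          else b)
          = (fun (b : Option Int × Option Int) s =>
          if q s then (if ds ≤ s then updMin b.1 s else b.1, updMin b.2 s) else b) := rfl
      rw [hfun, foldl_updMin_pair q ds K none none]
      simp only [foldl_updMin_none]
      rw [← min?_id_perm (hperm.filter (fun s => q s && decide (ds ≤ s))),
          ← min?_id_perm (hperm.filter q)]
      cases hA : PySem.List.min? (L.filter q) (fun x => x) with
      | none =>
        simp only []
        set R1 := L.filter (fun s => decide (ds ≤ s)) with hR1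
        set R2 := L.filter (fun s => decide (s < ds)) with hR2
        have hfil : L.filter q = [] := (PySem.List.min?_eq_none_iff _ _).mp hA
        have hnom : ∀ x ∈ L, q x = false := fun x hx => by
          cases hqb : q x
          · rfl
          · exact absurd (hfil ▸ List.mem_filter.mpr ⟨hx, hqb⟩) (List.not_mem_nil)
        have hsub : ∀ x ∈ R1 ++ R2, x ∈ L := fun x hx => by
          rcases List.mem_append.mp hx with h | h
          · exact (List.mem_filter.mp h).1
          · exact (List.mem_filter.mp h).1
        have hJ : List.findIdx? q (R1 ++ R2) = none := by
          rw [List.findIdx?_eq_none_iff]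
          intro x hx
          exact hnom x (hsub x hx)
        have hRlen : (R1 ++ R2).length = L.length := by
          rw [hR1, hR2, ← drop_eq_filter_ge L hplt di hdilt ds hgetd,
            ← take_eq_filter_lt L hplt di hdilt ds hgetd]
          simp
          omega
        by_cases h2 : L.length = 2
        · rw [if_pos (by simp [h2])]
          obtain ⟨a, b, hab⟩ := List.length_eq_two.mp (by rw [hRlen, h2] : (R1 ++ R2).length = 2)
          have hqa : (dd.getD a 0 == pu) = false := hnom a (hsub a (by rw [hab]; simp))
          have hqb : (dd.getD b 0 == pu) = false := hnom b (hsub b (by rw [hab]; simp))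
          rw [hab]
          simp [PySem.List.pyGet?, PySem.List.pyIdx?, hqa, hqb]
        · rw [if_neg (by simp [h2]), hJ]
      | some ba =>
        simp only []
        have hRlen : (L.filter (fun s => decide (ds ≤ s)) ++ L.filter (fun s => decide (s < ds))).length = L.length := by
          rw [← drop_eq_filter_ge L hplt di hdilt ds hgetd,
            ← take_eq_filter_lt L hplt di hdilt ds hgetd]
          simp
          omega
        have hbaF : ba ∈ L.filter q := PySem.List.min?_mem hA
        have hbaL : ba ∈ L := (List.mem_filter.mp hbaF).1
        have hbaq : q ba = true := (List.mem_filter.mp hbaF).2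
        have hbaMin : ∀ y ∈ L.filter q, ba ≤ y := PySem.List.min?_isMin hA
        cases hG : PySem.List.min? (L.filter (fun s => q s && decide (ds ≤ s))) (fun x => x) with
        | some bg =>
          simp only []
          have hbgF := PySem.List.min?_mem hG
          have hbgL : bg ∈ L := (List.mem_filter.mp hbgF).1
          obtain ⟨hbgq, hdsbg'⟩ := Bool.and_eq_true_iff.mp (List.mem_filter.mp hbgF).2
          have hdsbg : ds ≤ bg := of_decide_eq_true hdsbg'
          have hbgR1 : bg ∈ L.filter (fun s => decide (ds ≤ s)) :=
            List.mem_filter.mpr ⟨hbgL, by simpa using hdsbg⟩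
          have hminR1 : ∀ x ∈ L.filter (fun s => decide (ds ≤ s)), q x = true → bg ≤ x := by
            intro x hx hqx
            exact PySem.List.min?_isMin hG x
              (List.mem_filter.mpr ⟨(List.mem_filter.mp hx).1, by simp [hqx, (List.mem_filter.mp hx).2]⟩)
          have hj1 := findIdx?_sorted q (L.filter (fun s => decide (ds ≤ s))) (hplt.filter _)
            bg hbgR1 hbgq hminR1
          have hJ : List.findIdx? q
              (L.filter (fun s => decide (ds ≤ s)) ++ L.filter (fun s => decide (s < ds)))
              = some (((L.filter (fun s => decide (ds ≤ s))).filter (fun s => decide (s < bg))).length) := by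
            rw [List.findIdx?_append, hj1]; rfl
          -- the rotation index equals B's interval count
          have hcnt : ((((L.filter (fun s => decide (ds ≤ s))).filter (fun s => decide (s < bg))).length : Nat) : Int)
              = ((K.filter (fun s => decide (ds < s) && decide (s ≤ bg))).length : Int) := by
            have hKL : (K.filter (fun s => decide (ds < s) && decide (s ≤ bg))).length
                = (L.filter (fun s => decide (ds < s) && decide (s ≤ bg))).length :=
              ((hperm.filter _).length_eq).symm
            rw [hKL, List.filter_filter]
            rw [← List.countP_eq_length_filter, ← List.countP_eq_length_filter]
            rcases eq_or_lt_of_le hdsbg with rfl | hlt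
            · rw [List.countP_eq_zero.mpr (fun a _ => by simp),
                List.countP_eq_zero.mpr (fun a _ => by simp)]
            · have e1 := countP_with_mem hLnd hdsL (fun s => decide (s < bg) && decide (ds ≤ s))
                (by simp; omega)
              have e2 := countP_with_mem hLnd hbgL (fun s => decide (ds < s) && decide (s ≤ bg))
                (by simp; omega)
              rw [e1, e2]
              rw [List.countP_congr (fun y _ => iff_of_eq (congrArg (· = true) (bool_interval₁ ds bg y))),
                List.countP_congr (fun y _ => iff_of_eq (congrArg (· = true) (bool_interval₂ ds bg y)))]
          exact A_branch_eq dd pu ds L hn2 _ _ hJ hRlen hcnt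
        | none =>
          simp only []
          have hP1 : L.filter (fun s => q s && decide (ds ≤ s)) = [] :=
            (PySem.List.min?_eq_none_iff _ _).mp hG
          have hnoge : ∀ x ∈ L, q x = true → x < ds := by
            intro x hx hqx
            by_contra hge
            exact absurd (hP1 ▸ List.mem_filter.mpr ⟨hx, by simp [hqx]; omega⟩) (List.not_mem_nil)
          have hbads : ba < ds := hnoge ba hbaL hbaq
          have hbaR2 : ba ∈ L.filter (fun s => decide (s < ds)) :=
            List.mem_filter.mpr ⟨hbaL, by simpa using hbads⟩
          have hminR2 : ∀ x ∈ L.filter (fun s => decide (s < ds)), q x = true → ba ≤ x := by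
            intro x hx hqx
            exact hbaMin x (List.mem_filter.mpr ⟨(List.mem_filter.mp hx).1, hqx⟩)
          have hj1 := findIdx?_sorted q (L.filter (fun s => decide (s < ds))) (hplt.filter _)
            ba hbaR2 hbaq hminR2
          have hnoR1 : List.findIdx? q (L.filter (fun s => decide (ds ≤ s))) = none := by
            rw [List.findIdx?_eq_none_iff]
            intro x hx
            cases hqx : q x
            · rfl
            · have := hnoge x (List.mem_filter.mp hx).1 hqx
              have := of_decide_eq_true (List.mem_filter.mp hx).2
              omega
          have hJ : List.findIdx? q
              (L.filter (fun s => decide (ds ≤ s)) ++ L.filter (fun s => decide (s < ds)))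
              = some ((((L.filter (fun s => decide (s < ds))).filter (fun s => decide (s < ba))).length)
                  + (L.filter (fun s => decide (ds ≤ s))).length) := by
            rw [List.findIdx?_append, hnoR1, hj1]; rfl
          have hcnt : (((((L.filter (fun s => decide (s < ds))).filter (fun s => decide (s < ba))).length)
                  + (L.filter (fun s => decide (ds ≤ s))).length : Nat) : Int)
              = (L.length : Int) - ((K.filter (fun s => decide (ba < s) && decide (s ≤ ds))).length : Int) := by
            have hKL : (K.filter (fun s => decide (ba < s) && decide (s ≤ ds))).length
                = (L.filter (fun s => decide (ba < s) && decide (s ≤ ds))).length :=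
              ((hperm.filter _).length_eq).symm
            rw [hKL, List.filter_filter]
            rw [← List.countP_eq_length_filter, ← List.countP_eq_length_filter, ← List.countP_eq_length_filter]
            -- name the pieces and finish by arithmetic
            have hc1 : L.countP (fun s => decide (s < ba) && decide (s < ds))
                = L.countP (fun s => decide (s < ba)) := by
              apply List.countP_congr
              intro y _
              by_cases h : y < ba
              · simp [h]; omega
              · simp [h]
            have hc2 : L.countP (fun s => decide (ba < s) && decide (s ≤ ds))
                = L.countP (fun s => decide (ba < s) && decide (s < ds)) + 1 := by
              have := countP_with_mem hLnd hdsL (fun s => decide (ba < s) && decide (s ≤ ds))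
                (by simp; omega)
              rw [this, List.countP_congr (fun y _ => iff_of_eq (congrArg (· = true) (bool_interval₂ ba ds y)))]
            have hc3 : L.countP (fun s => decide (s < ds))
                = L.countP (fun s => decide (s < ds) && decide (s ≤ ba))
                  + L.countP (fun s => decide (s < ds) && !(decide (s ≤ ba))) :=
              countP_split L _ _
            have hc4 : L.countP (fun s => decide (s < ds) && decide (s ≤ ba))
                = L.countP (fun s => decide (s < ba)) + 1 := by
              have e := countP_with_mem hLnd hbaL (fun s => decide (s < ds) && decide (s ≤ ba))
                (by simp; omega)
              rw [e]
              congr 1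
              apply List.countP_congr
              intro y _
              by_cases h : y < ba
              · simp [h]; omega
              · simp [h]; omega
            have hc5 : L.countP (fun s => decide (s < ds) && !(decide (s ≤ ba)))
                = L.countP (fun s => decide (ba < s) && decide (s < ds)) := by
              apply List.countP_congr
              intro y _
              by_cases h1 : y < ds
              · by_cases h2 : ba < y
                · simp [h1, h2]
                · simp [h1, h2]
              · by_cases h2 : ba < y
                · simp [h1, h2]
                · simp [h1, h2]
            have hpart : L.countP (fun s => decide (ds ≤ s)) + L.countP (fun s => decide (s < ds))
                = L.length := by
              have := hRlen
              simp only [List.length_append, ← List.countP_eq_length_filter] at this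
              omega
            omega
          exact A_branch_eq dd pu ds L hn2 _ _ hJ hRlen hcnt
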